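-- pv_equiv track=rewrite | github.com/ishitajonnala/DAA_AIE22119 | Lab5.py | pylons
-- ===== SOURCE A (Python) =====
-- def pylons(k, arr):
--     n = len(arr)
--     plants = 0
--     i = 0
--
--     while i < n:
--         found_plant = False
--         for j in range(min(i + k - 1, n - 1), i - k, -1):
--             if arr[j] == 1:
--                 plants += 1
--                 found_plant = True
--                 i = j + k
--                 break
--
--         if not found_plant:
--             return -1
--
--     return plants
-- ===== SOURCE B (Python) =====
-- def pylons(k, arr):
--     # A different algorithm: consume the precomputed (ascending) list of plant
--     # positions in a single left-to-right pass instead of rescanning a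
--     # width-2k index window at every step.
--     n = len(arr)
--     plants = [i for i, v in enumerate(arr) if v == 1]
--     count = 0
--     idx = 0
--     i = 0
--     while i < n:
--         best = None
--         while idx < len(plants) and plants[idx] <= i + k - 1:
--             best = plants[idx]
--             idx += 1
--         if best is None or best < i - k + 1:
--             return -1
--         count += 1
--         i = best + k
--     return count
-- ===== Notes on version B (the rewrite author's own statement) =====
-- stated objective: alternative
-- what changed: B precomputes the ascending list of plant positions once and consumes it in a single left-to-right pass, instead of A's per-step descending rescan of a width-2k index window; B also avoids A's negative-index wraparound (see differs) and returns -1 on the inputs where A raises IndexError (excluded by Pre_).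
-- intended difference: On inputs where no plant lies within reach of position 0 but a plant sits in the last k-1 cells (and the rest of the array is coverable), A's descending scan wraps around via Python negative indexing, counts that far plant as if it stood near position 0 and returns a positive pylon count (e.g. 3 on k=2, [0,0,1,0,1]); B returns -1, the intended answer, since position 0 is genuinely uncoverable. — e.g. on pylons(2, [0, 0, 1, 0, 1]): A returns 3, B returns -1
import Mathlib
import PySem

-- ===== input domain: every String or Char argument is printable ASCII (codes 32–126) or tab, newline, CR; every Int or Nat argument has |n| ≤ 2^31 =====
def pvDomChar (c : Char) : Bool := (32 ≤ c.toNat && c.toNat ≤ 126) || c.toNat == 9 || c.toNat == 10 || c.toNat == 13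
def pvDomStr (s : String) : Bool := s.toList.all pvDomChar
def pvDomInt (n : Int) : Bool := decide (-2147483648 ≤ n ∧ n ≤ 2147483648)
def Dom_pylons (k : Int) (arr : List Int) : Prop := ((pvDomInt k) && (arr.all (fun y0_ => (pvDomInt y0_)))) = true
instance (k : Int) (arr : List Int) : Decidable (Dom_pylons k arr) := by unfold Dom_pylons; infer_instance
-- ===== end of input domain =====

-- B is a different algorithm: instead of A's per-step descending scan of a
-- width-2k index window, B precomputes the ascending list of plant positions and
-- consumes it in one left-to-right pass; see D_pylons for the one intended
-- behavioural difference (A's negative-index wraparound at the start).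

-- ===== PORT A =====
-- inner 'for j in range(...)' with break: first j in the countdown range whose
-- arr[j] == 1; 'some none' = range exhausted (found_plant stays False);
-- 'none' = IndexError from arr[j] (propagated; excluded by Pre_pylons).
def pyScanA (arr : List Int) : List Int → Option (Option Int)
  | [] => some none
  | j :: rest =>
    match PySem.List.pyGet? arr j with
    | none => none
    | some v => if v == 1 then some (some j) else pyScanA arr rest

-- needed by pylonsLoop's termination proof
theorem pyScanA_found_mem (arr : List Int) (r : List Int) (j : Int)
    (h : pyScanA arr r = some (some j)) : j ∈ r := by
  induction r with
  | nil => simp [pyScanA] at h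
  | cons a rest ih =>
    unfold pyScanA at h
    cases hg : PySem.List.pyGet? arr a with
    | none => rw [hg] at h; simp at h
    | some v =>
      rw [hg] at h
      by_cases hv : v == 1
      · simp [hv] at h; simp [h]
      · simp [hv] at h; exact List.mem_cons_of_mem _ (ih h)

def pylonsLoop (k : Int) (n : Int) (arr : List Int) (i : Int) (plants : Int) :
    Option Int :=
  if _h : i < n then
    match hs : pyScanA arr (PySem.List.pyRange (min (i + k - 1) (n - 1)) (i - k) (-1)) with
    | none => none
    | some none => some (-1)
    | some (some j) => pylonsLoop k n arr (j + k) (plants + 1)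
  else some plants
termination_by (n - i).toNat
decreasing_by
  have hj := pyScanA_found_mem arr _ j hs
  have hlt := (PySem.List.mem_pyRange_neg_one.mp hj).1
  omega

def pylons (k : Int) (arr : List Int) : Int :=
  match pylonsLoop k (arr.length : Int) arr 0 0 with
  | some v => v
  | none => 0      -- IndexError (excluded by Pre_pylons)

-- ===== PORT B =====
-- plants = [i for i, v in enumerate(arr) if v == 1]
def plantList (arr : List Int) : List Int :=
  ((PySem.List.enumerate arr 0).filter (fun p => p.2 == 1)).map (fun p => p.1)

-- the inner 'while idx < len(plants) and plants[idx] <= i + k - 1' loop;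
-- the index idx is represented by the remaining suffix of plants.
def advanceB (top : Int) : List Int → Option Int → Option Int × List Int
  | [], best => (best, [])
  | p :: rest, best => if p ≤ top then advanceB top rest (some p) else (best, p :: rest)

def altLoop (k : Int) (n : Int) (i : Int) (count : Int) (plants : List Int) : Int :=
  if _h : i < n then
    match advanceB (i + k - 1) plants none with
    | (none, _) => -1
    | (some best, rest) =>
      if _hb : best < i - k + 1 then -1
      else altLoop k n (best + k) (count + 1) rest
  else count
termination_by (n - i).toNat
decreasing_by omega

def pylons_alt (k : Int) (arr : List Int) : Int :=
  altLoop k (arr.length : Int) 0 0 (plantList arr)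

-- ===== PRECONDITION & SPEC =====
-- Pre_ excludes exactly the inputs where A raises IndexError: a nonempty array
-- containing no 1 with k ≥ len(arr) + 2 (A's descending scan walks past -len).
def Pre_pylons (k : Int) (arr : List Int) : Prop :=
  ¬ (arr ≠ [] ∧ (∀ x ∈ arr, x ≠ 1) ∧ (arr.length : Int) + 2 ≤ k)
instance (k : Int) (arr : List Int) : Decidable (Pre_pylons k arr) := by
  unfold Pre_pylons; infer_instance

def pvWitness_pylons : Int × List Int := (2, [1, 0, 1])

-- covAt k arr p: some plant of arr lies strictly within distance k of position p
abbrev covAt (k : Int) (arr : List Int) (p : Int) : Prop :=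
  ∃ j < arr.length, arr.getD j 0 = 1 ∧ p - k < j ∧ j < p + k

-- On inputs where no plant lies within reach of position 0 but a plant near the end of
-- the array exists and every position from A's wraparound restart on is coverable, A's
-- scan wraps around via Python's negative indexing, treats that far plant as if it stood
-- near position 0, and returns a positive pylon count; B returns -1, the intended answer,
-- since position 0 is genuinely uncoverable.
def D_pylons (k : Int) (arr : List Int) : Prop :=
  ¬ covAt k arr 0 ∧ ∃ M < arr.length, arr.getD M 0 = 1 ∧
    ∀ p < arr.length, (M : Int) + k ≤ p + arr.length → covAt k arr p
instance (k : Int) (arr : List Int) : Decidable (D_pylons k arr) := by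
  unfold D_pylons; infer_instance

def Spec_pylons (k : Int) (arr : List Int) (out : Int) : Prop :=
  ¬ D_pylons k arr → out = pylons_alt k arr
instance (k : Int) (arr : List Int) (out : Int) : Decidable (Spec_pylons k arr out) := by
  unfold Spec_pylons; infer_instance

def pvDiffWitness_pylons : Int × List Int := (2, [0, 0, 1, 0, 1])
def pvDiffWitnessOut_pylons : Int × Int := (3, -1)

-- ===== CLAIM (what is proved, stated in full; the proofs are below) =====
def Claim_unchanged_pylons : Prop := ∀ (k : Int) (arr : List Int),
  Dom_pylons k arr → Pre_pylons k arr → Spec_pylons k arr (pylons k arr)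
def Claim_changed_pylons : Prop :=
  Dom_pylons (pvDiffWitness_pylons.1) (pvDiffWitness_pylons.2) ∧
  Pre_pylons (pvDiffWitness_pylons.1) (pvDiffWitness_pylons.2) ∧
  D_pylons (pvDiffWitness_pylons.1) (pvDiffWitness_pylons.2) ∧
  pylons (pvDiffWitness_pylons.1) (pvDiffWitness_pylons.2) = pvDiffWitnessOut_pylons.1 ∧
  pylons_alt (pvDiffWitness_pylons.1) (pvDiffWitness_pylons.2) = pvDiffWitnessOut_pylons.2 ∧
  pvDiffWitnessOut_pylons.1 ≠ pvDiffWitnessOut_pylons.2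
def Claim_exact_pylons : Prop := ∀ (k : Int) (arr : List Int),
  Dom_pylons k arr → Pre_pylons k arr → D_pylons k arr → pylons k arr ≠ pylons_alt k arr

-- ===== LEMMAS AND PROOFS =====

-- step lemmas for the two loops
theorem pylonsLoop_exit (k n : Int) (arr : List Int) (i c : Int) (h : ¬ i < n) :
    pylonsLoop k n arr i c = some c := by
  rw [pylonsLoop, dif_neg h]

theorem pylonsLoop_found (k n : Int) (arr : List Int) (i c j : Int) (h : i < n)
    (hs : pyScanA arr (PySem.List.pyRange (min (i + k - 1) (n - 1)) (i - k) (-1)) = some (some j)) :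
    pylonsLoop k n arr i c = pylonsLoop k n arr (j + k) (c + 1) := by
  rw [pylonsLoop, dif_pos h]
  split <;> simp_all

theorem pylonsLoop_nofind (k n : Int) (arr : List Int) (i c : Int) (h : i < n)
    (hs : pyScanA arr (PySem.List.pyRange (min (i + k - 1) (n - 1)) (i - k) (-1)) = some none) :
    pylonsLoop k n arr i c = some (-1) := by
  rw [pylonsLoop, dif_pos h]
  split <;> simp_all

theorem altLoop_exit (k n i c : Int) (plants : List Int) (h : ¬ i < n) :
    altLoop k n i c plants = c := by
  rw [altLoop, dif_neg h]

theorem altLoop_none (k n i c : Int) (plants rest : List Int) (h : i < n)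
    (ha : advanceB (i + k - 1) plants none = (none, rest)) :
    altLoop k n i c plants = -1 := by
  rw [altLoop, dif_pos h]
  split <;> simp_all

theorem altLoop_step (k n i c best : Int) (plants rest : List Int) (h : i < n)
    (ha : advanceB (i + k - 1) plants none = (some best, rest)) (hl : ¬ best < i - k + 1) :
    altLoop k n i c plants = altLoop k n (best + k) (c + 1) rest := by
  rw [altLoop, dif_pos h]
  split <;> simp_all

-- plantList facts
theorem mem_plantList (arr : List Int) (x : Int) :
    x ∈ plantList arr ↔ ∃ m : Nat, m < arr.length ∧ x = (m : Int) ∧ arr.getD m 0 = 1 := by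
  unfold plantList
  rw [PySem.List.enumerate_eq_map_pyRange arr 0]
  constructor
  · intro hx
    rw [List.mem_map] at hx
    obtain ⟨⟨j, v⟩, hmem, rfl⟩ := hx
    rw [List.mem_filter] at hmem
    obtain ⟨hmem1, hv⟩ := hmem
    rw [List.mem_map] at hmem1
    obtain ⟨j', hj', heq⟩ := hmem1
    have h1 : j' = j := congrArg Prod.fst heq
    have h2 : PySem.List.pyGetD arr j' 0 = v := congrArg Prod.snd heq
    rw [PySem.List.mem_pyRange_one] at hj'
    rw [PySem.List.len_eq] at hj'
    simp only [beq_iff_eq] at hv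
    refine ⟨j'.toNat, by omega, ?_, ?_⟩
    · show j = ((j'.toNat : Nat) : Int)
      omega
    · have hcast : j' = ((j'.toNat : Nat) : Int) := by omega
      rw [hcast, PySem.List.pyGetD_natCast] at h2
      rw [hv] at h2
      simpa using h2
  · rintro ⟨m, hm, rfl, hv⟩
    rw [List.mem_map]
    refine ⟨((m : Int), PySem.List.pyGetD arr (m : Int) 0), ?_, rfl⟩
    rw [List.mem_filter]
    constructor
    · rw [List.mem_map]
      refine ⟨(m : Int), ?_, rfl⟩
      rw [PySem.List.mem_pyRange_one, PySem.List.len_eq]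
      constructor <;> omega
    · rw [PySem.List.pyGetD_natCast]
      simpa using hv

theorem plantList_sorted (arr : List Int) : (plantList arr).Pairwise (· < ·) := by
  unfold plantList
  rw [PySem.List.enumerate_eq_map_pyRange arr 0]
  rw [List.pairwise_map]
  apply List.Pairwise.sublist List.filter_sublist
  rw [List.pairwise_map]
  exact (PySem.List.pairwise_lt_pyRange_one 0 (PySem.List.len arr))

theorem plantList_nonneg (arr : List Int) (x : Int) (hx : x ∈ plantList arr) :
    0 ≤ x ∧ x ≤ (arr.length : Int) - 1 := by
  obtain ⟨m, hm, rfl, _⟩ := (mem_plantList arr x).mp hx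
  omega

theorem pyGet?_of_plant (arr : List Int) (x : Int) (hx : x ∈ plantList arr) :
    PySem.List.pyGet? arr x = some 1 := by
  obtain ⟨m, hm, rfl, hv⟩ := (mem_plantList arr x).mp hx
  rw [PySem.List.pyGet?_natCast]
  rw [List.getElem?_eq_getElem hm]
  rw [List.getD_eq_getElem arr 0 hm] at hv
  simp [hv]

theorem plant_of_pyGet? (arr : List Int) (x : Int) (h0 : 0 ≤ x)
    (h : PySem.List.pyGet? arr x = some 1) : x ∈ plantList arr := by
  rw [PySem.List.pyGet?_of_nonneg arr h0] at h
  have hm : x.toNat < arr.length := by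
    by_contra hc
    rw [List.getElem?_eq_none (by omega)] at h
    simp at h
  rw [List.getElem?_eq_getElem hm] at h
  refine (mem_plantList arr x).mpr ⟨x.toNat, hm, by omega, ?_⟩
  rw [List.getD_eq_getElem arr 0 hm]
  simpa using h

theorem nat_plant_mem (arr : List Int) (m : Nat) (hm : m < arr.length)
    (h : arr.getD m 0 = 1) : (m : Int) ∈ plantList arr :=
  (mem_plantList arr (m : Int)).mpr ⟨m, hm, rfl, h⟩

-- negative Python index read
theorem pyGet?_neg_eq (arr : List Int) (j : Int) (hj : j < 0) (hjn : -(arr.length : Int) ≤ j) :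
    PySem.List.pyGet? arr j = arr[((arr.length : Int) + j).toNat]? := by
  have h1 : j = -(((-j).toNat : Nat) : Int) := by omega
  rw [h1, PySem.List.pyGet?_neg_natCast arr (-j).toNat (by omega) (by omega)]
  congr 1
  omega

theorem neg_plant (arr : List Int) (j : Int) (hj : j < 0) (hjn : -(arr.length : Int) ≤ j)
    (h : PySem.List.pyGet? arr j = some 1) :
    ∃ m : Nat, m < arr.length ∧ (m : Int) = (arr.length : Int) + j ∧ arr.getD m 0 = 1 := by
  rw [pyGet?_neg_eq arr j hj hjn] at h
  set m := ((arr.length : Int) + j).toNat with hmdef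
  have hm : m < arr.length := by omega
  rw [List.getElem?_eq_getElem hm] at h
  refine ⟨m, hm, by omega, ?_⟩
  rw [List.getD_eq_getElem arr 0 hm]
  simpa using h

theorem pyScanA_nil (arr : List Int) : pyScanA arr [] = some none := rfl
theorem pyScanA_cons (arr : List Int) (j : Int) (rest : List Int) :
    pyScanA arr (j :: rest) =
      match PySem.List.pyGet? arr j with
      | none => none
      | some v => if v == 1 then some (some j) else pyScanA arr rest := rfl

-- A's inner scan: skip a prefix of non-plants
theorem scanA_skip (arr : List Int) (r1 r2 : List Int)
    (h : ∀ j ∈ r1, ∃ v, PySem.List.pyGet? arr j = some v ∧ v ≠ 1) :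
    pyScanA arr (r1 ++ r2) = pyScanA arr r2 := by
  induction r1 with
  | nil => simp
  | cons a t ih =>
    obtain ⟨v, hv, hv1⟩ := h a (List.mem_cons_self ..)
    rw [List.cons_append, pyScanA_cons, hv]
    simp only [beq_iff_eq, if_neg hv1]
    exact ih (fun j hj => h j (List.mem_cons_of_mem _ hj))

-- descending range split at a member
theorem pyRange_desc_split (hi lo jm : Int) (hlo : lo < jm) (hhi : jm ≤ hi) :
    PySem.List.pyRange hi lo (-1) =
      PySem.List.pyRange hi jm (-1) ++ jm :: PySem.List.pyRange (jm - 1) lo (-1) := by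
  rw [PySem.List.pyRange_neg_one_eq_reverse hi lo,
      PySem.List.pyRange_one_append (lo + 1) jm (hi + 1) (by omega) (by omega),
      PySem.List.pyRange_one_cons (by omega : jm < hi + 1)]
  rw [List.reverse_append, List.reverse_cons]
  rw [PySem.List.pyRange_neg_one_eq_reverse hi jm,
      PySem.List.pyRange_neg_one_eq_reverse (jm - 1) lo]
  simp [List.append_assoc]

theorem scanA_some (arr : List Int) (hi lo jm : Int)
    (hlo : lo < jm) (hhi : jm ≤ hi)
    (hjm : PySem.List.pyGet? arr jm = some 1)
    (hmax : ∀ j : Int, jm < j → j ≤ hi → PySem.List.pyGet? arr j ≠ some 1)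
    (hvalid : ∀ j : Int, jm < j → j ≤ hi → PySem.List.pyGet? arr j ≠ none) :
    pyScanA arr (PySem.List.pyRange hi lo (-1)) = some (some jm) := by
  rw [pyRange_desc_split hi lo jm hlo hhi]
  rw [scanA_skip]
  · rw [pyScanA_cons, hjm]
    simp
  · intro j hj
    have hj' := PySem.List.mem_pyRange_neg_one.mp hj
    cases hv : PySem.List.pyGet? arr j with
    | none => exact absurd hv (hvalid j hj'.1 hj'.2)
    | some v =>
      refine ⟨v, rfl, ?_⟩
      intro hv1
      exact hmax j hj'.1 hj'.2 (hv1 ▸ hv)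

theorem scanA_none (arr : List Int) (hi lo : Int)
    (hmax : ∀ j : Int, lo < j → j ≤ hi → PySem.List.pyGet? arr j ≠ some 1)
    (hvalid : ∀ j : Int, lo < j → j ≤ hi → PySem.List.pyGet? arr j ≠ none) :
    pyScanA arr (PySem.List.pyRange hi lo (-1)) = some none := by
  have := scanA_skip arr (PySem.List.pyRange hi lo (-1)) [] ?_
  · rw [List.append_nil] at this
    rw [this, pyScanA_nil]
  · intro j hj
    have hj' := PySem.List.mem_pyRange_neg_one.mp hj
    cases hv : PySem.List.pyGet? arr j with
    | none => exact absurd hv (hvalid j hj'.1 hj'.2)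
    | some v =>
      refine ⟨v, rfl, ?_⟩
      intro hv1
      exact hmax j hj'.1 hj'.2 (hv1 ▸ hv)

-- B's inner loop is takeWhile/dropWhile
theorem advanceB_eq (top : Int) (l : List Int) (b0 : Option Int) :
    advanceB top l b0 =
      (((l.takeWhile (fun p => decide (p ≤ top))).getLast?).elim b0 some,
       l.dropWhile (fun p => decide (p ≤ top))) := by
  induction l generalizing b0 with
  | nil => simp [advanceB]
  | cons a t ih =>
    by_cases ha : a ≤ top
    · rw [advanceB, if_pos ha, ih (some a)]
      rw [List.takeWhile_cons, List.dropWhile_cons, decide_eq_true ha]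
      simp only [if_pos]
      congr 1
      cases htw : t.takeWhile (fun p => decide (p ≤ top)) with
      | nil => simp
      | cons b u =>
        rw [List.getLast?_cons_cons]
        cases hgl : (b :: u).getLast? with
        | none => exact absurd (List.getLast?_eq_none_iff.mp hgl) (by simp)
        | some x => simp
    · rw [advanceB, if_neg ha]
      simp only [List.takeWhile_cons, List.dropWhile_cons, decide_eq_false ha]
      simp

-- takeWhile / dropWhile on a sorted list
theorem mem_takeWhile_le (top : Int) (l : List Int) (y : Int)
    (h : y ∈ l.takeWhile (fun p => decide (p ≤ top))) : y ∈ l ∧ y ≤ top :=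
  ⟨(l.takeWhile_sublist _).mem h, by simpa using List.mem_takeWhile_imp h⟩

theorem mem_takeWhile_sorted (top : Int) (l : List Int) (hl : l.Pairwise (· < ·)) (y : Int)
    (hy : y ∈ l) (hyt : y ≤ top) : y ∈ l.takeWhile (fun p => decide (p ≤ top)) := by
  induction l with
  | nil => simp at hy
  | cons a t ih =>
    rcases List.mem_cons.mp hy with rfl | hy'
    · simp [hyt]
    · have ha : a < y := (List.pairwise_cons.mp hl).1 y hy'
      have hat : a ≤ top := by omega
      rw [List.takeWhile_cons, decide_eq_true hat]
      simp only [if_pos]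
      exact List.mem_cons_of_mem _ (ih (List.pairwise_cons.mp hl).2 hy')

theorem mem_dropWhile_sorted (top : Int) (l : List Int) (hl : l.Pairwise (· < ·)) (y : Int) :
    y ∈ l.dropWhile (fun p => decide (p ≤ top)) ↔ y ∈ l ∧ top < y := by
  induction l with
  | nil => simp
  | cons a t ih =>
    rw [List.dropWhile_cons]
    by_cases ha : a ≤ top
    · rw [decide_eq_true ha]
      simp only [if_pos]
      rw [ih (List.pairwise_cons.mp hl).2]
      constructor
      · rintro ⟨h1, h2⟩; exact ⟨List.mem_cons_of_mem _ h1, h2⟩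
      · rintro ⟨h1, h2⟩
        rcases List.mem_cons.mp h1 with rfl | h1'
        · omega
        · exact ⟨h1', h2⟩
    · rw [decide_eq_false ha]
      simp only [if_neg, Bool.false_eq_true, not_false_iff]
      constructor
      · intro hy
        rcases List.mem_cons.mp hy with rfl | hy'
        · exact ⟨List.mem_cons_self .., by omega⟩
        · have := (List.pairwise_cons.mp hl).1 y hy'
          exact ⟨hy, by omega⟩
      · rintro ⟨h1, _⟩; exact h1

theorem sorted_getLast?_max (l : List Int) (hl : l.Pairwise (· < ·)) (x : Int)
    (h : l.getLast? = some x) : x ∈ l ∧ ∀ y ∈ l, y ≤ x := by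
  induction l with
  | nil => simp at h
  | cons a t ih =>
    cases t with
    | nil =>
      simp at h
      subst h
      simp
    | cons b u =>
      rw [List.getLast?_cons_cons] at h
      obtain ⟨hx1, hx2⟩ := ih (List.pairwise_cons.mp hl).2 h
      refine ⟨List.mem_cons_of_mem _ hx1, ?_⟩
      intro y hy
      rcases List.mem_cons.mp hy with rfl | hy'
      · have := (List.pairwise_cons.mp hl).1 x hx1; omega
      · exact hx2 y hy'

-- best = some x from B's inner loop: x is the greatest element of l below top
theorem best_spec (top : Int) (l : List Int) (hl : l.Pairwise (· < ·)) (x : Int)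
    (h : (l.takeWhile (fun p => decide (p ≤ top))).getLast? = some x) :
    x ∈ l ∧ x ≤ top ∧ ∀ y ∈ l, y ≤ top → y ≤ x := by
  have htws : (l.takeWhile (fun p => decide (p ≤ top))).Pairwise (· < ·) :=
    List.Pairwise.sublist (List.takeWhile_sublist _) hl
  obtain ⟨hx1, hx2⟩ := sorted_getLast?_max _ htws x h
  obtain ⟨hxl, hxt⟩ := mem_takeWhile_le top l x hx1
  exact ⟨hxl, hxt, fun y hy hyt => hx2 y (mem_takeWhile_sorted top l hl y hy hyt)⟩

theorem best_none (top : Int) (l : List Int) (hl : l.Pairwise (· < ·))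
    (h : (l.takeWhile (fun p => decide (p ≤ top))).getLast? = none) :
    ∀ y ∈ l, ¬ y ≤ top := by
  intro y hy hyt
  have := mem_takeWhile_sorted top l hl y hy hyt
  rw [List.getLast?_eq_none_iff.mp h] at this
  simp at this

-- B returns -1 immediately when no plant is within reach of position 0
theorem alt_neg_one (k : Int) (arr : List Int) (hn : arr ≠ [])
    (hfw : ∀ p ∈ plantList arr, ¬ p ≤ k - 1) : pylons_alt k arr = -1 := by
  unfold pylons_alt
  have hn' : (0 : Int) < (arr.length : Int) := by
    simp [List.length_pos_iff]
    exact hn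
  have htwnil : (plantList arr).takeWhile (fun p => decide (p ≤ 0 + k - 1)) = [] := by
    rcases hq : plantList arr with _ | ⟨a, t⟩
    · rfl
    · have ha := hfw a (by rw [hq]; exact List.mem_cons_self ..)
      rw [List.takeWhile_cons, decide_eq_false (by omega : ¬ a ≤ 0 + k - 1)]
      simp
  have htw : ((plantList arr).takeWhile (fun p => decide (p ≤ 0 + k - 1))).getLast? = none := by
    rw [htwnil]
    rfl
  have ha : advanceB (0 + k - 1) (plantList arr) none =
      (none, (plantList arr).dropWhile (fun p => decide (p ≤ 0 + k - 1))) := by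
    rw [advanceB_eq, htw]
    rfl
  exact altLoop_none k (arr.length : Int) 0 0 _ _ hn' ha

-- MAIN equivalence of the two loops from a clean state
theorem main_loop (k : Int) (arr : List Int) (N : Nat) (i c : Int) (suffix : List Int)
    (hk : 1 ≤ k) (hi0 : 0 ≤ i)
    (hN : ((arr.length : Int) - i).toNat = N)
    (hsuf : ∀ p : Int, p ∈ suffix ↔ p ∈ plantList arr ∧ i - k < p)
    (hsorted : suffix.Pairwise (· < ·))
    (hwin : i = 0 → i < (arr.length : Int) → ∃ p ∈ plantList arr, p ≤ k - 1)
    (hstart : i = 0 ∨ k ≤ i) :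
    pylonsLoop k (arr.length : Int) arr i c = some (altLoop k (arr.length : Int) i c suffix) := by
  induction N using Nat.strong_induction_on generalizing i c suffix with
  | _ N ih =>
  by_cases hin : i < (arr.length : Int)
  · -- one loop step
    set n : Int := (arr.length : Int) with hnn
    set top : Int := i + k - 1 with htop
    cases hbest : ((suffix.takeWhile (fun p => decide (p ≤ top))).getLast?) with
    | some best =>
      obtain ⟨hbs, hbt, hbmax⟩ := best_spec top suffix hsorted best hbest
      obtain ⟨hbp, hbgt⟩ := (hsuf best).mp hbs
      obtain ⟨hb0, hbn1⟩ := plantList_nonneg arr best hbp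
      have ha : advanceB (i + k - 1) suffix none =
          (some best, suffix.dropWhile (fun p => decide (p ≤ top))) := by
        rw [advanceB_eq, hbest]; rfl
      have hnb : ¬ best < i - k + 1 := by omega
      rw [altLoop_step k n i c best suffix _ hin ha hnb]
      -- A finds the same index
      have hscan : pyScanA arr (PySem.List.pyRange (min (i + k - 1) (n - 1)) (i - k) (-1))
          = some (some best) := by
        apply scanA_some arr _ _ best (by omega) (by omega) (pyGet?_of_plant arr best hbp)
        · intro j hj1 hj2 hjp
          have hjpl : j ∈ plantList arr := plant_of_pyGet? arr j (by omega) hjp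
          have hjs : j ∈ suffix := (hsuf j).mpr ⟨hjpl, by omega⟩
          have := hbmax j hjs (by omega)
          omega
        · intro j hj1 hj2
          rw [Ne, PySem.List.pyGet?_eq_none_iff]
          simp only [not_not]
          unfold PySem.Raise.InRange
          omega
      rw [pylonsLoop_found k n arr i c best hin hscan]
      -- recurse
      have hdec : ((n : Int) - (best + k)).toNat < N := by clear hwin hsuf; omega
      apply ih ((n - (best + k)).toNat) hdec (best + k) (c + 1) _ (by omega) rfl
      · intro p
        rw [mem_dropWhile_sorted top suffix hsorted p, hsuf p]
        constructor
        · rintro ⟨⟨h1, _⟩, h3⟩; exact ⟨h1, by omega⟩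
        · rintro ⟨h1, h2⟩
          by_cases hple : p ≤ top
          · have hps : p ∈ suffix := (hsuf p).mpr ⟨h1, by omega⟩
            have := hbmax p hps hple
            omega
          · exact ⟨⟨h1, by omega⟩, by omega⟩
      · exact List.Pairwise.sublist (List.dropWhile_sublist _) hsorted
      · intro h0; omega
      · right; omega
    | none =>
      have hnone := best_none top suffix hsorted hbest
      have ha : advanceB (i + k - 1) suffix none =
          (none, suffix.dropWhile (fun p => decide (p ≤ top))) := by
        rw [advanceB_eq, hbest]; rfl
      rw [altLoop_none k n i c suffix _ hin ha]
      -- i = 0 is impossible here (hwin provides a plant in the first window)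
      have hik : k ≤ i := by
        rcases hstart with rfl | hik
        · obtain ⟨p, hp, hpk⟩ := hwin rfl hin
          have hp0 := (plantList_nonneg arr p hp).1
          have : p ∈ suffix := (hsuf p).mpr ⟨hp, by omega⟩
          exact absurd hpk (by have := hnone p this; omega)
        · exact hik
      have hscan : pyScanA arr (PySem.List.pyRange (min (i + k - 1) (n - 1)) (i - k) (-1))
          = some none := by
        apply scanA_none
        · intro j hj1 hj2 hjp
          have hjpl : j ∈ plantList arr := plant_of_pyGet? arr j (by omega) hjp
          have hjs : j ∈ suffix := (hsuf j).mpr ⟨hjpl, by omega⟩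
          have := hnone j hjs
          omega
        · intro j hj1 hj2
          rw [Ne, PySem.List.pyGet?_eq_none_iff]
          simp only [not_not]
          unfold PySem.Raise.InRange
          omega
      rw [pylonsLoop_nofind k n arr i c hin hscan]
  · rw [pylonsLoop_exit _ _ _ _ _ hin, altLoop_exit _ _ _ _ _ hin]

-- A's first step on a D_ input: the wraparound pick of the rightmost plant
theorem phantom_step (k : Int) (arr : List Int) (hk : 1 ≤ k) (hn : arr ≠ [])
    (M : Nat) (hM : M < arr.length) (hMp : arr.getD M 0 = 1)
    (hMmax : ∀ j : Nat, j < arr.length → M < j → arr.getD j 0 ≠ 1)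
    (hMhi : (arr.length : Int) - k + 1 ≤ (M : Int))
    (hfw : ∀ p ∈ plantList arr, ¬ p ≤ k - 1) (c : Int) :
    pylonsLoop k (arr.length : Int) arr 0 c =
      pylonsLoop k (arr.length : Int) arr ((M : Int) - (arr.length : Int) + k) (c + 1) := by
  set n : Int := (arr.length : Int) with hnn
  have hn1 : (1 : Int) ≤ n := by
    have : 0 < arr.length := List.length_pos_iff.mpr hn
    omega
  have hjm : (M : Int) - n < 0 := by omega
  have hscan : pyScanA arr (PySem.List.pyRange (min (0 + k - 1) (n - 1)) (0 - k) (-1))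
      = some (some ((M : Int) - n)) := by
    apply scanA_some arr _ _ ((M : Int) - n) (by omega) (by omega)
    · rw [pyGet?_neg_eq arr _ (by omega) (by omega)]
      have : ((n + ((M : Int) - n)).toNat) = M := by omega
      rw [this, List.getElem?_eq_getElem hM]
      rw [List.getD_eq_getElem arr 0 hM] at hMp
      simp [hMp]
    · intro j hj1 hj2 hjp
      by_cases hj0 : 0 ≤ j
      · have hjpl : j ∈ plantList arr := plant_of_pyGet? arr j hj0 hjp
        exact hfw j hjpl (by omega)
      · obtain ⟨m, hm, hmj, hmp⟩ := neg_plant arr j (by omega) (by omega) hjp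
        exact hMmax m hm (by omega) hmp
    · intro j hj1 hj2
      rw [Ne, PySem.List.pyGet?_eq_none_iff]
      simp only [not_not]
      unfold PySem.Raise.InRange
      omega
  exact pylonsLoop_found k n arr 0 c _ (by omega) hscan

-- under a failed coverage witness p0 A's greedy run (wherever it starts below p0) dies
theorem fail_loop (k : Int) (arr : List Int) (hk : 1 ≤ k)
    (M : Nat) (_hM : M < arr.length)
    (hMmax : ∀ j : Nat, j < arr.length → M < j → arr.getD j 0 ≠ 1)
    (p0 : Int) (hp0n : p0 < (arr.length : Int))
    (hp0 : ∀ q ∈ plantList arr, ¬ (p0 - k + 1 ≤ q ∧ q ≤ p0 + k - 1))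
    (N : Nat) (i c : Int)
    (hNi : (p0 - i).toNat = N)
    (hiM : (M : Int) - (arr.length : Int) + k ≤ i) (hip : i ≤ p0) :
    pylonsLoop k (arr.length : Int) arr i c = some (-1) := by
  induction N using Nat.strong_induction_on generalizing i c with
  | _ N ih =>
  set n : Int := (arr.length : Int) with hnn
  have hin : i < n := by omega
  set hi : Int := min (i + k - 1) (n - 1) with hhi
  have hnegok : ∀ j : Int, i - k < j → j < 0 → PySem.List.pyGet? arr j ≠ some 1 := by
    intro j hj1 hj2 hjp
    obtain ⟨m, hm, hmj, hmp⟩ := neg_plant arr j hj2 (by omega) hjp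
    exact hMmax m hm (by omega) hmp
  have hvalid : ∀ j : Int, i - k < j → j ≤ hi → PySem.List.pyGet? arr j ≠ none := by
    intro j hj1 hj2
    rw [Ne, PySem.List.pyGet?_eq_none_iff]
    simp only [not_not]
    unfold PySem.Raise.InRange
    omega
  cases hbest : (((plantList arr).takeWhile (fun p => decide (p ≤ hi))).getLast?) with
  | some q =>
    obtain ⟨hqp, hqt, hqmax⟩ := best_spec hi (plantList arr) (plantList_sorted arr) q hbest
    obtain ⟨hq0, hqn1⟩ := plantList_nonneg arr q hqp
    by_cases hqlow : q ≤ i - k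
    · -- every plant ≤ hi is out of the window: scan finds nothing
      rw [pylonsLoop_nofind k n arr i c hin ?_]
      apply scanA_none
      · intro j hj1 hj2 hjp
        by_cases hj0 : 0 ≤ j
        · have hjpl : j ∈ plantList arr := plant_of_pyGet? arr j hj0 hjp
          have := hqmax j hjpl hj2
          omega
        · exact absurd hjp (hnegok j hj1 (by omega))
      · exact hvalid
    · -- scan finds q; q is left of the hole, so the next state is still ≤ p0
      rw [pylonsLoop_found k n arr i c q hin ?_]
      · have hq_not_win : ¬ (p0 - k + 1 ≤ q ∧ q ≤ p0 + k - 1) := hp0 q hqp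
        have hqlt : q + k ≤ p0 := by omega
        exact ih ((p0 - (q + k)).toNat) (by omega) (q + k) (c + 1) rfl (by omega) hqlt
      · apply scanA_some arr _ _ q (by omega) (by omega) (pyGet?_of_plant arr q hqp)
        · intro j hj1 hj2 hjp
          have hjpl : j ∈ plantList arr := plant_of_pyGet? arr j (by omega) hjp
          have := hqmax j hjpl hj2
          omega
        · intro j hj1 hj2
          exact hvalid j (by omega) hj2
  | none =>
    have hnone := best_none hi (plantList arr) (plantList_sorted arr) hbest
    rw [pylonsLoop_nofind k n arr i c hin ?_]
    apply scanA_none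
    · intro j hj1 hj2 hjp
      by_cases hj0 : 0 ≤ j
      · exact hnone j (plant_of_pyGet? arr j hj0 hjp) hj2
      · exact absurd hjp (hnegok j hj1 (by omega))
    · exact hvalid

-- with full coverage from i0 on, A's greedy run succeeds (returns its counter)
theorem succ_loop (k : Int) (arr : List Int) (_hk : 1 ≤ k) (i0 : Int)
    (hcov : ∀ p : Int, i0 ≤ p → 0 ≤ p → p < (arr.length : Int) →
      ∃ q ∈ plantList arr, p - k + 1 ≤ q ∧ q ≤ p + k - 1)
    (N : Nat) (i c : Int) (hNi : ((arr.length : Int) - i).toNat = N)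
    (hi0 : i0 ≤ i) (hi00 : 0 ≤ i) :
    ∃ r : Int, pylonsLoop k (arr.length : Int) arr i c = some r ∧ c ≤ r := by
  induction N using Nat.strong_induction_on generalizing i c with
  | _ N ih =>
  set n : Int := (arr.length : Int) with hnn
  by_cases hin : i < n
  · obtain ⟨q, hqp, hq1, hq2⟩ := hcov i hi0 hi00 hin
    obtain ⟨hq0, hqn1⟩ := plantList_nonneg arr q hqp
    set hi : Int := min (i + k - 1) (n - 1) with hhi
    have hqhi : q ≤ hi := by omega
    have hqtw : q ∈ (plantList arr).takeWhile (fun p => decide (p ≤ hi)) :=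
      mem_takeWhile_sorted hi (plantList arr) (plantList_sorted arr) q hqp hqhi
    cases hbest : (((plantList arr).takeWhile (fun p => decide (p ≤ hi))).getLast?) with
    | none =>
      rw [List.getLast?_eq_none_iff.mp hbest] at hqtw
      simp at hqtw
    | some qm =>
      obtain ⟨hqmp, hqmt, hqmmax⟩ := best_spec hi (plantList arr) (plantList_sorted arr) qm hbest
      obtain ⟨hqm0, hqmn1⟩ := plantList_nonneg arr qm hqmp
      have hqmge : q ≤ qm := hqmmax q hqp hqhi
      have hscan : pyScanA arr (PySem.List.pyRange hi (i - k) (-1)) = some (some qm) := by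
        apply scanA_some arr _ _ qm (by omega) (by omega) (pyGet?_of_plant arr qm hqmp)
        · intro j hj1 hj2 hjp
          have hjpl : j ∈ plantList arr := plant_of_pyGet? arr j (by omega) hjp
          have := hqmmax j hjpl hj2
          omega
        · intro j hj1 hj2
          rw [Ne, PySem.List.pyGet?_eq_none_iff]
          simp only [not_not]
          unfold PySem.Raise.InRange
          omega
      rw [pylonsLoop_found k n arr i c qm hin hscan]
      obtain ⟨r, hr, hcr⟩ := ih ((n - (qm + k)).toNat) (by omega) (qm + k) (c + 1) rfl
        (by omega) (by omega)
      exact ⟨r, hr, by omega⟩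
  · exact ⟨c, pylonsLoop_exit _ _ _ _ _ hin, le_refl c⟩

-- helpers to move between ¬D_ / Pre_ phrasing and plantList
theorem no_one_iff_plantList_nil (arr : List Int) :
    plantList arr = [] ↔ ∀ x ∈ arr, x ≠ 1 := by
  constructor
  · intro h x hx hx1
    obtain ⟨m, hm, rfl⟩ := List.mem_iff_getElem.mp hx
    have : ((m : Int)) ∈ plantList arr := by
      apply nat_plant_mem arr m hm
      rw [List.getD_eq_getElem arr 0 hm]
      exact hx1
    rw [h] at this
    simp at this
  · intro h
    by_contra hne
    obtain ⟨q, hq⟩ := List.exists_mem_of_ne_nil _ hne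
    obtain ⟨m, hm, rfl, hmp⟩ := (mem_plantList arr q).mp hq
    rw [List.getD_eq_getElem arr 0 hm] at hmp
    exact h _ (List.getElem_mem hm) hmp

theorem empty_case (k : Int) : pylons k [] = pylons_alt k [] := by
  have hA : pylonsLoop k ((List.length ([] : List Int) : Nat) : Int) [] 0 0 = some 0 :=
    pylonsLoop_exit _ _ _ _ _ (by norm_num)
  have hB : altLoop k ((List.length ([] : List Int) : Nat) : Int) 0 0 (plantList []) = 0 :=
    altLoop_exit _ _ _ _ _ (by norm_num)
  unfold pylons pylons_alt
  rw [hA, hB]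

-- ===== VERDICT (by name: the statement is the Claim_ definition above) =====
theorem pylons_spec : Claim_unchanged_pylons := by
  intro k arr _hDom hPre
  unfold Spec_pylons
  intro hnD
  by_cases hnil : arr = []
  · subst hnil; exact empty_case k
  have hn1 : (1 : Int) ≤ (arr.length : Int) := by
    have : 0 < arr.length := List.length_pos_iff.mpr hnil
    omega
  set n : Int := (arr.length : Int) with hnn
  by_cases hk1 : 1 ≤ k
  · by_cases hfw : ∃ p ∈ plantList arr, p ≤ k - 1
    · -- a plant covers position 0: clean run, the two loops agree step for step
      have h := main_loop k arr (n - 0).toNat 0 0 (plantList arr) hk1 (le_refl 0) rfl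
        (fun p => ⟨fun hp => ⟨hp, by have := (plantList_nonneg arr p hp).1; omega⟩,
                   fun hp => hp.1⟩)
        (plantList_sorted arr) (fun _ _ => hfw) (Or.inl rfl)
      unfold pylons pylons_alt
      rw [h]
    · have hfw2 : ∀ p ∈ plantList arr, ¬ p ≤ k - 1 := by
        intro p hp hle
        exact hfw ⟨p, hp, hle⟩
      have hB : pylons_alt k arr = -1 := alt_neg_one k arr hnil hfw2
      by_cases hpl : ∃ q ∈ plantList arr, n - k + 1 ≤ q
      · -- wraparound would fire; since ¬D_, coverage fails somewhere right of the
        -- phantom restart, and A's run dies with -1 as well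
        obtain ⟨q0, hq0, hq0ge⟩ := hpl
        have hplne : plantList arr ≠ [] := by intro h; rw [h] at hq0; simp at hq0
        have hglne : (plantList arr).getLast? ≠ none :=
          fun h => hplne (List.getLast?_eq_none_iff.mp h)
        obtain ⟨Mq, hMq⟩ := Option.ne_none_iff_exists'.mp hglne
        obtain ⟨hMqm, hMqmax⟩ := sorted_getLast?_max _ (plantList_sorted arr) Mq hMq
        obtain ⟨hMq0, hMqn1⟩ := plantList_nonneg arr Mq hMqm
        set Mn : Nat := Mq.toNat with hMn
        have hMcast : (Mn : Int) = Mq := by omega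
        obtain ⟨m', hm', hm'e, hm'p⟩ := (mem_plantList arr Mq).mp hMqm
        have hMlt : Mn < arr.length := by omega
        have hMp : arr.getD Mn 0 = 1 := by
          have : Mn = m' := by omega
          rw [this]; exact hm'p
        have hMmaxN : ∀ j : Nat, j < arr.length → Mn < j → arr.getD j 0 ≠ 1 := by
          intro j hj hMj hjp
          have := hMqmax _ (nat_plant_mem arr j hj hjp)
          omega
        have hMge : n - k + 1 ≤ (Mn : Int) := by
          have := hMqmax q0 hq0
          omega
        have hnc0 : ¬ covAt k arr 0 := by
          rintro ⟨j, hj, hjp, hj1, hj2⟩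
          exact hfw2 _ (nat_plant_mem arr j hj hjp) (by omega)
        have hcovfail : ¬ (∀ p, p < arr.length →
            (Mn : Int) + k ≤ (p : Int) + arr.length → covAt k arr (p : Int)) := by
          intro hcov
          exact hnD ⟨hnc0, Mn, hMlt, hMp, hcov⟩
        push_neg at hcovfail
        obtain ⟨p, hpn, hpge, hphole⟩ := hcovfail
        have hp0 : ∀ q ∈ plantList arr, ¬ ((p : Int) - k + 1 ≤ q ∧ q ≤ (p : Int) + k - 1) := by
          rintro q hq ⟨hq1, hq2⟩
          obtain ⟨m, hm, rfl, hmp⟩ := (mem_plantList arr q).mp hq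
          have h1 := hphole m hm hmp (by omega)
          omega
        have hA : pylonsLoop k n arr 0 0 = some (-1) := by
          rw [phantom_step k arr hk1 hnil Mn hMlt hMp hMmaxN hMge hfw2 0]
          exact fail_loop k arr hk1 Mn hMlt hMmaxN (p : Int) (by omega) hp0
            ((p : Int) - ((Mn : Int) - n + k)).toNat _ _ rfl (le_refl _) (by omega)
        unfold pylons
        rw [hnn] at hA
        rw [hA, hB]
      · -- no plant reaches position 0 even through the wraparound: both return -1
        have hpl2 : ∀ q ∈ plantList arr, ¬ (n - k + 1 ≤ q) := by
          intro q hq hge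
          exact hpl ⟨q, hq, hge⟩
        have hkn : k ≤ n + 1 := by
          by_cases hplnil : plantList arr = []
          · have hno1 := (no_one_iff_plantList_nil arr).mp hplnil
            by_contra hc
            exact hPre ⟨hnil, hno1, by omega⟩
          · obtain ⟨q, hq⟩ := List.exists_mem_of_ne_nil _ hplnil
            have h1 := hfw2 q hq
            have h2 := (plantList_nonneg arr q hq).2
            omega
        have hscan : pyScanA arr
            (PySem.List.pyRange (min (0 + k - 1) (n - 1)) (0 - k) (-1)) = some none := by
          apply scanA_none
          · intro j hj1 hj2 hjp
            by_cases hj0 : 0 ≤ j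
            · have hjpl := plant_of_pyGet? arr j hj0 hjp
              have := hfw2 j hjpl
              omega
            · obtain ⟨m, hm, hmj, hmp⟩ := neg_plant arr j (by omega) (by omega) hjp
              have := hpl2 _ (nat_plant_mem arr m hm hmp)
              omega
          · intro j hj1 hj2
            rw [Ne, PySem.List.pyGet?_eq_none_iff]
            simp only [not_not]
            unfold PySem.Raise.InRange
            omega
        have hA : pylonsLoop k n arr 0 0 = some (-1) :=
          pylonsLoop_nofind k n arr 0 0 (by omega) hscan
        unfold pylons
        rw [hnn] at hA
        rw [hA, hB]
  · -- k ≤ 0: A's window is empty at once, B finds no usable plant: both -1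
    have hr : PySem.List.pyRange (min (0 + k - 1) (n - 1)) (0 - k) (-1) = [] :=
      PySem.List.pyRange_neg_one_eq_nil (by omega)
    have hscan : pyScanA arr (PySem.List.pyRange (min (0 + k - 1) (n - 1)) (0 - k) (-1))
        = some none := by rw [hr]; rfl
    have hA : pylonsLoop k n arr 0 0 = some (-1) :=
      pylonsLoop_nofind k n arr 0 0 (by omega) hscan
    have hB : pylons_alt k arr = -1 := by
      apply alt_neg_one k arr hnil
      intro p hp
      have := (plantList_nonneg arr p hp).1
      omega
    unfold pylons
    rw [hnn] at hA
    rw [hA, hB]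

theorem pylons_tight : Claim_exact_pylons := by
  intro k arr _hDom _hPre hD
  obtain ⟨hnc0, M, hMlt0, hMp0, hcov⟩ := hD
  have hnil : arr ≠ [] := by
    intro h
    rw [h] at hMlt0
    simp at hMlt0
  have hn1 : (1 : Int) ≤ (arr.length : Int) := by omega
  have hk1 : 1 ≤ k := by
    by_contra hc
    obtain ⟨j, hj, hjp, hj1, hj2⟩ := hcov (arr.length - 1) (by omega) (by omega)
    omega
  have hfw : ∀ p ∈ plantList arr, ¬ p ≤ k - 1 := by
    intro p hp hle
    obtain ⟨m, hm, rfl, hmp⟩ := (mem_plantList arr p).mp hp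
    exact hnc0 ⟨m, hm, hmp, by omega, by omega⟩
  have hB : pylons_alt k arr = -1 := alt_neg_one k arr hnil hfw
  -- locate the rightmost plant, which is what A's wraparound scan picks
  have hplm : ((M : Int)) ∈ plantList arr := nat_plant_mem arr M hMlt0 hMp0
  have hplne : plantList arr ≠ [] := by intro h; rw [h] at hplm; simp at hplm
  have hglne : (plantList arr).getLast? ≠ none :=
    fun h => hplne (List.getLast?_eq_none_iff.mp h)
  obtain ⟨Mq, hMq⟩ := Option.ne_none_iff_exists'.mp hglne
  obtain ⟨hMqm, hMqmax⟩ := sorted_getLast?_max _ (plantList_sorted arr) Mq hMq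
  obtain ⟨hMq0, hMqn1⟩ := plantList_nonneg arr Mq hMqm
  obtain ⟨m', hm', hm'e, hm'p⟩ := (mem_plantList arr Mq).mp hMqm
  have hMM : (M : Int) ≤ Mq := hMqmax _ hplm
  set Mn : Nat := Mq.toNat with hMn
  have hMcast : (Mn : Int) = Mq := by omega
  have hMlt : Mn < arr.length := by omega
  have hMp : arr.getD Mn 0 = 1 := by
    have : Mn = m' := by omega
    rw [this]; exact hm'p
  have hMmaxN : ∀ j : Nat, j < arr.length → Mn < j → arr.getD j 0 ≠ 1 := by
    intro j hj hMj hjp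
    have := hMqmax _ (nat_plant_mem arr j hj hjp)
    omega
  have hMge : (arr.length : Int) - k + 1 ≤ (Mn : Int) := by
    by_contra hc
    exact hnc0 (hcov 0 (by omega) (by omega))
  have hcov' : ∀ p : Int, (Mn : Int) - (arr.length : Int) + k ≤ p → 0 ≤ p →
      p < (arr.length : Int) → ∃ q ∈ plantList arr, p - k + 1 ≤ q ∧ q ≤ p + k - 1 := by
    intro p hp1 hp2 hp3
    obtain ⟨j, hj, hjp, hj1, hj2⟩ := hcov p.toNat (by omega) (by omega)
    exact ⟨(j : Int), nat_plant_mem arr j hj hjp, by omega, by omega⟩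
  obtain ⟨r, hr, h1r⟩ := succ_loop k arr hk1 ((Mn : Int) - (arr.length : Int) + k) hcov'
    ((arr.length : Int) - ((Mn : Int) - (arr.length : Int) + k)).toNat
    ((Mn : Int) - (arr.length : Int) + k) 1 rfl (le_refl _) (by omega)
  have hA : pylonsLoop k (arr.length : Int) arr 0 0 = some r := by
    rw [phantom_step k arr hk1 hnil Mn hMlt hMp hMmaxN hMge hfw 0]
    exact hr
  unfold pylons
  rw [hA, hB]
  show r ≠ -1
  omega

theorem pylons_changed : Claim_changed_pylons := by
  unfold Claim_changed_pylons
  refine ⟨by decide, by decide, by decide, ?_, ?_, by decide⟩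
  · show pylons 2 [0, 0, 1, 0, 1] = 3
    have hlen : ((List.length [(0:Int), 0, 1, 0, 1] : Nat) : Int) = 5 := by norm_num
    have hA : pylonsLoop 2 5 [0, 0, 1, 0, 1] 0 0 = some 3 := by
      rw [pylonsLoop_found 2 5 _ 0 0 (-1) (by norm_num) (by decide)]; norm_num
      rw [pylonsLoop_found 2 5 _ 1 1 2 (by norm_num) (by decide)]; norm_num
      rw [pylonsLoop_found 2 5 _ 4 2 4 (by norm_num) (by decide)]; norm_num
      rw [pylonsLoop_exit 2 5 _ 6 3 (by norm_num)]
    unfold pylons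
    rw [hlen, hA]
  · show pylons_alt 2 [0, 0, 1, 0, 1] = -1
    have hlen : ((List.length [(0:Int), 0, 1, 0, 1] : Nat) : Int) = 5 := by norm_num
    have hpl : plantList [0, 0, 1, 0, 1] = [2, 4] := by decide
    unfold pylons_alt
    rw [hlen, hpl]
    rw [altLoop_none 2 5 0 0 [2, 4] [2, 4] (by norm_num) (by decide)]
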